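-- pv_equiv track=rewrite | github.com/i-redbyte/leetcode | easy/maximum 69 number/solution.py | maximum69Number
-- ===== SOURCE A (Python) =====
-- def maximum69Number(num: int) -> int:
--     current = 0
--     firstSixIndex = -1
--     copyValue = num
--     while copyValue:
--         if copyValue % 10 == 6:
--             firstSixIndex = current
--         copyValue //= 10
--         current += 1
--
--     if firstSixIndex == -1:
--         return num
--     else:
--         return num + 3 * (10 ** firstSixIndex)
-- ===== SOURCE B (Python) =====
-- def maximum69Number(num: int) -> int:
--     # Recursive digit rebuild: replace the most significant 6 with 9, no index/power bookkeeping.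
--     def fix(n):
--         if n == 0:
--             return 0
--         q, r = divmod(n, 10)
--         fq = fix(q)
--         if fq != q:          # a 6 higher up was already replaced: keep this digit
--             return fq * 10 + r
--         return fq * 10 + (9 if r == 6 else r)
--     return fix(num)
-- ===== Notes on version B (the rewrite author's own statement) =====
-- stated objective: alternative
-- what changed: B rebuilds the number by structural recursion on its digits, replacing the most significant 6 with 9 in place, instead of A's index-tracking loop followed by adding 3*10**index.
import Mathlib
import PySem

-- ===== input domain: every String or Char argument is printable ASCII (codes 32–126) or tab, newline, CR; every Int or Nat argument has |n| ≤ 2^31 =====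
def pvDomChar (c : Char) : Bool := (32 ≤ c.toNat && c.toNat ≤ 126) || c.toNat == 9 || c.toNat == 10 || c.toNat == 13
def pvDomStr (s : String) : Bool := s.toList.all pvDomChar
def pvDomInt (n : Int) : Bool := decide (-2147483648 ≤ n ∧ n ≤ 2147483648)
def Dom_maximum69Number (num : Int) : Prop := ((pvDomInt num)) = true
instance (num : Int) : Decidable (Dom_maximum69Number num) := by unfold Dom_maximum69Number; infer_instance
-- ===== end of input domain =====

-- B replaces A's index-tracking digit loop + 3*10**i addition by a structural recursion that
-- rebuilds the number with its most significant 6 turned into 9 (objective: alternative).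
-- Both programs fail to return on negative input (A loops forever, B recurses forever), hence Pre_.

-- ===== PORT A =====
-- the while loop of A; Python diverges when copyValue < 0, so the port stops there (outside Pre_)
def pvLoopA (copyValue current firstSixIndex : Int) : Int :=
  if h : copyValue ≤ 0 then firstSixIndex
  else pvLoopA (PySem.Int.floordiv copyValue 10) (current + 1)
        (if PySem.Int.mod copyValue 10 = 6 then current else firstSixIndex)
  termination_by copyValue.toNat
  decreasing_by
    have h1 : PySem.Int.floordiv copyValue 10 < copyValue :=
      (PySem.Int.floordiv_lt_iff_lt_mul (by omega)).mpr (by omega)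
    have h2 : (0:Int) ≤ PySem.Int.floordiv copyValue 10 :=
      (PySem.Int.le_floordiv_iff_mul_le (by omega)).mpr (by omega)
    omega

def maximum69Number (num : Int) : Int :=
  let firstSixIndex := pvLoopA num 0 (-1)
  if firstSixIndex = -1 then num
  -- Python's 10 ** firstSixIndex: here firstSixIndex ≥ 0 (it was set to some current ≥ 0), so .toNat is exact
  else num + 3 * 10 ^ firstSixIndex.toNat

-- ===== PORT B =====
-- fix(n) from Source B; Python's recursion does not return for n < 0 (outside Pre_), the port stops there
def pvFixB (n : Int) : Int :=
  if h : n ≤ 0 then n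
  else
    let q := PySem.Int.floordiv n 10
    let r := PySem.Int.mod n 10
    let fq := pvFixB q
    if fq ≠ q then fq * 10 + r
    else fq * 10 + (if r = 6 then 9 else r)
  termination_by n.toNat
  decreasing_by
    have h1 : PySem.Int.floordiv n 10 < n :=
      (PySem.Int.floordiv_lt_iff_lt_mul (by omega)).mpr (by omega)
    have h2 : (0:Int) ≤ PySem.Int.floordiv n 10 :=
      (PySem.Int.le_floordiv_iff_mul_le (by omega)).mpr (by omega)
    omega

def maximum69Number_alt (num : Int) : Int := pvFixB num

-- ===== PRECONDITION & SPEC =====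
-- Pre_ excludes negative num, on which Python A loops forever (and Python B hits RecursionError)
def Pre_maximum69Number (num : Int) : Prop := 0 ≤ num
instance (num : Int) : Decidable (Pre_maximum69Number num) := by unfold Pre_maximum69Number; infer_instance
def pvWitness_maximum69Number : Int := (69)

def Spec_maximum69Number (num : Int) (out : Int) : Prop := out = maximum69Number_alt num
instance (num : Int) (out : Int) : Decidable (Spec_maximum69Number num out) := by unfold Spec_maximum69Number; infer_instance

-- ===== CLAIM (what is proved, stated in full; the proofs are below) =====
def Claim_equal_maximum69Number : Prop := ∀ (num : Int), Dom_maximum69Number num → Pre_maximum69Number num → Spec_maximum69Number num (maximum69Number num)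

-- ===== LEMMAS AND PROOFS =====

-- position (from the least significant digit) of the most significant 6 of n, if any
def pvSixIdx (n : Int) : Option Nat :=
  if h : n ≤ 0 then none
  else
    match pvSixIdx (PySem.Int.floordiv n 10) with
    | some k => some (k + 1)
    | none => if PySem.Int.mod n 10 = 6 then some 0 else none
  termination_by n.toNat
  decreasing_by
    have h1 : PySem.Int.floordiv n 10 < n :=
      (PySem.Int.floordiv_lt_iff_lt_mul (by omega)).mpr (by omega)
    have h2 : (0:Int) ≤ PySem.Int.floordiv n 10 :=
      (PySem.Int.le_floordiv_iff_mul_le (by omega)).mpr (by omega)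
    omega

theorem pvSixIdx_pos (n : Int) (h0 : ¬ n ≤ 0) :
    pvSixIdx n = match pvSixIdx (PySem.Int.floordiv n 10) with
      | some k => some (k + 1)
      | none => if PySem.Int.mod n 10 = 6 then some 0 else none := by
  rw [pvSixIdx]; simp [h0]

theorem pvLoopA_eq (n : Int) (hn : 0 ≤ n) (c f : Int) :
    pvLoopA n c f = (pvSixIdx n).elim f (fun k => c + k) := by
  by_cases h0 : n ≤ 0
  · rw [pvLoopA, pvSixIdx]; simp [h0]
  · have h1 : PySem.Int.floordiv n 10 < n :=
      (PySem.Int.floordiv_lt_iff_lt_mul (by omega)).mpr (by omega)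
    have h2 : (0:Int) ≤ PySem.Int.floordiv n 10 :=
      (PySem.Int.le_floordiv_iff_mul_le (by omega)).mpr (by omega)
    have hstep := pvSixIdx_pos n h0
    rw [pvLoopA]
    simp only [h0, dite_false]
    rw [pvLoopA_eq (PySem.Int.floordiv n 10) h2]
    rcases hJ : pvSixIdx (PySem.Int.floordiv n 10) with _ | k <;> rw [hJ] at hstep
    · simp only at hstep
      rw [hstep]
      split_ifs <;> simp
    · simp only at hstep
      rw [hstep]
      simp only [Option.elim_some]
      push_cast; ring
  termination_by n.toNat
  decreasing_by omega

theorem pvFixB_eq (n : Int) (hn : 0 ≤ n) :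
    pvFixB n = (pvSixIdx n).elim n (fun k => n + 3 * 10 ^ k) := by
  by_cases h0 : n ≤ 0
  · rw [pvFixB, pvSixIdx]; simp [h0]
  · have h1 : PySem.Int.floordiv n 10 < n :=
      (PySem.Int.floordiv_lt_iff_lt_mul (by omega)).mpr (by omega)
    have h2 : (0:Int) ≤ PySem.Int.floordiv n 10 :=
      (PySem.Int.le_floordiv_iff_mul_le (by omega)).mpr (by omega)
    have hdm : PySem.Int.floordiv n 10 * 10 + PySem.Int.mod n 10 = n :=
      PySem.Int.floordiv_mul_add_mod n 10
    have hstep := pvSixIdx_pos n h0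
    rw [pvFixB]
    simp only [h0, dite_false]
    rw [pvFixB_eq (PySem.Int.floordiv n 10) h2]
    rcases hJ : pvSixIdx (PySem.Int.floordiv n 10) with _ | k <;> rw [hJ] at hstep
    · simp only at hstep
      rw [hstep]
      simp only [Option.elim_none, ne_eq, not_true_eq_false, reduceIte]
      split_ifs with hr6
      · have h10 : (10:Int) ^ (0:Nat) = 1 := pow_zero 10
        simp only [Option.elim_some]
        omega
      · simp only [Option.elim_none]
        omega
    · simp only at hstep
      rw [hstep]
      have hk : (0:Int) < 10 ^ k := pow_pos (by norm_num) k
      have hne : PySem.Int.floordiv n 10 + 3 * 10 ^ k ≠ PySem.Int.floordiv n 10 := by omega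
      simp only [Option.elim_some, hne, ne_eq, not_false_eq_true, reduceIte]
      have hsucc : (10:Int) ^ (k + 1) = 10 ^ k * 10 := pow_succ 10 k
      omega
  termination_by n.toNat
  decreasing_by omega

-- ===== VERDICT (by name: the statement is the Claim_ definition above) =====
theorem maximum69Number_spec : Claim_equal_maximum69Number := by
  intro num _hdom hpre
  unfold Spec_maximum69Number maximum69Number maximum69Number_alt
  rw [pvLoopA_eq num hpre, pvFixB_eq num hpre]
  rcases pvSixIdx num with _ | k
  · simp
  · simp only [Option.elim_some]
    have h1 : ((0:Int) + k) ≠ -1 := by omega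
    simp only [h1, if_false, reduceIte]
    have h2 : ((0:Int) + k).toNat = k := by omega
    rw [h2]
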